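-- pv_equiv track=rewrite | github.com/shellpi/xlang | src/parser.py | __x_parse
-- ===== SOURCE A (Python) =====
-- def __x_parse(code):
--     output = []
--     Code   = code.replace('\n', ' ')
--     iter_  = 1
--     for c in Code.split('"'):
--         if iter_ % 2 == 1:
--             output.append(c.replace(' ', ''))
--             iter_ += 1
--         else:
--             output.append(c)
--             iter_ += 1
--
--     return output
-- ===== SOURCE B (Python) =====
-- def __x_parse(code):
--     output = []
--     cur = ''
--     inside = False
--     for ch in code:
--         c = ' ' if ch == '\n' else ch
--         if c == '"':
--             output.append(cur)
--             cur = ''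
--             inside = not inside
--         elif inside:
--             cur += c
--         elif c != ' ':
--             cur += c
--     output.append(cur)
--     return output
-- ===== Notes on version B (the rewrite author's own statement) =====
-- stated objective: alternative
-- what changed: Replaced replace-then-split-then-alternating-strip (three passes building intermediate strings) by a single-pass character state machine with an inside-quotes flag that emits segments directly.
import Mathlib
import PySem

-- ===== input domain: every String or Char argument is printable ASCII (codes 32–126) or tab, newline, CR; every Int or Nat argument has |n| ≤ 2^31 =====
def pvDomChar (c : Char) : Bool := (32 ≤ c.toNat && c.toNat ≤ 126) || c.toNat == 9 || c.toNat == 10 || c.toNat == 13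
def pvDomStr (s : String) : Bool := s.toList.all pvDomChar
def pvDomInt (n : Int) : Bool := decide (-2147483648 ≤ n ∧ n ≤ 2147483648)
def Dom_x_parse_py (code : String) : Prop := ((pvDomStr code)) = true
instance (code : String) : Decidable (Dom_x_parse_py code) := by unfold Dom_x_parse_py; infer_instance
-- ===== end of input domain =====

-- B replaces A's replace-then-split-then-alternating-strip (three passes with intermediate
-- strings) by a single-pass character state machine with an inside-quotes flag (same result, one pass).

-- ===== PORT A =====
-- Ported on the List Char side (PySem.Str.* are thin wrappers over PySem.Chars.* on toList);
-- code.replace('\n',' ') → PySem.Chars.replace, Code.split('"') → PySem.Chars.splitOn (sep ≠ ""),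
-- c.replace(' ','') → PySem.Chars.replace; the loop with its (output, iter_) state is a foldl.
def x_parse_py (code : String) : List String :=
  let Code := PySem.Chars.replace code.toList ['\n'] [' ']
  let st := (PySem.Chars.splitOn Code ['"']).foldl
    (fun (st : List (List Char) × Int) c =>
      if PySem.Int.mod st.2 2 = 1 then (st.1 ++ [PySem.Chars.replace c [' '] []], st.2 + 1)
      else (st.1 ++ [c], st.2 + 1)) ([], 1)
  st.1.map (fun l => String.ofList l)

-- ===== PORT B =====
-- c = ' ' if ch == '\n' else ch
def pvNl (ch : Char) : Char := if ch = '\n' then ' ' else ch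

def x_parse_py_alt (code : String) : List String :=
  let st := code.toList.foldl
    (fun (st : List (List Char) × List Char × Bool) ch =>
      let c := pvNl ch
      if c = '"' then (st.1 ++ [st.2.1], [], !st.2.2)
      else if st.2.2 then (st.1, st.2.1 ++ [c], st.2.2)
      else if c = ' ' then st
      else (st.1, st.2.1 ++ [c], st.2.2))
    ([], [], false)
  (st.1 ++ [st.2.1]).map (fun l => String.ofList l)

-- ===== PRECONDITION & SPEC =====
def Spec_x_parse_py (code : String) (out : List String) : Prop := out = x_parse_py_alt code
instance (code : String) (out : List String) : Decidable (Spec_x_parse_py code out) := by unfold Spec_x_parse_py; infer_instance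

-- ===== CLAIM (what is proved, stated in full; the proofs are below) =====
def Claim_equal_x_parse_py : Prop := ∀ (code : String), Dom_x_parse_py code → Spec_x_parse_py code (x_parse_py code)

-- ===== LEMMAS AND PROOFS =====

-- split on '"' as a structural recursion
def pvSplitQ : List Char → List (List Char)
  | [] => [[]]
  | c :: t =>
    if c = '"' then [] :: pvSplitQ t
    else
      match pvSplitQ t with
      | [] => [[c]]
      | h :: r => (c :: h) :: r

-- alternating segment processing: flag true = remove all spaces
def pvAltS : Bool → List (List Char) → List (List Char)
  | _, [] => []
  | b, h :: t => (if b then h.filter (· ≠ ' ') else h) :: pvAltS (!b) t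

theorem pvSplitQ_ne_nil (l : List Char) : pvSplitQ l ≠ [] := by
  cases l with
  | nil => simp [pvSplitQ]
  | cons c t =>
    simp only [pvSplitQ]
    split
    · simp
    · cases pvSplitQ t <;> simp

theorem pv_replace_nl_go (l : List Char) (fuel : Nat) (acc : List Char)
    (h : l.length ≤ fuel) :
    PySem.Chars.replace.go ['\n'] [' '] fuel l acc = acc.reverse ++ l.map pvNl := by
  induction l generalizing fuel acc with
  | nil => cases fuel <;> simp [PySem.Chars.replace.go]
  | cons c t ih =>
    cases fuel with
    | zero => simp at h
    | succ f =>
      simp only [PySem.Chars.replace.go, List.isPrefixOf]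
      by_cases hc : c = '\n'
      · subst hc
        simp only [beq_self_eq_true, Bool.true_and, if_pos, List.length_cons,
          List.length_nil, List.drop_succ_cons, List.drop_zero]
        rw [ih f _ (by simpa using Nat.le_of_succ_le_succ h)]
        simp [pvNl]
      · have hb : (('\n' == c) && true) = false := by simp [Ne.symm hc]
        simp only [hb, Bool.false_eq_true, if_false]
        rw [ih f _ (by simpa using Nat.le_of_succ_le_succ h)]
        simp [pvNl, hc]

theorem pv_replace_nl (l : List Char) :
    PySem.Chars.replace l ['\n'] [' '] = l.map pvNl := by
  simp only [PySem.Chars.replace, List.isEmpty]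
  exact pv_replace_nl_go l l.length [] le_rfl

theorem pv_replace_space_go (l : List Char) (fuel : Nat) (acc : List Char)
    (h : l.length ≤ fuel) :
    PySem.Chars.replace.go [' '] [] fuel l acc = acc.reverse ++ l.filter (· ≠ ' ') := by
  induction l generalizing fuel acc with
  | nil => cases fuel <;> simp [PySem.Chars.replace.go]
  | cons c t ih =>
    cases fuel with
    | zero => simp at h
    | succ f =>
      simp only [PySem.Chars.replace.go, List.isPrefixOf]
      by_cases hc : c = ' '
      · subst hc
        simp only [beq_self_eq_true, Bool.true_and, if_pos, List.length_cons,
          List.length_nil, List.drop_succ_cons, List.drop_zero]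
        rw [ih f _ (by simpa using Nat.le_of_succ_le_succ h)]
        simp [List.filter]
      · have hb : ((' ' == c) && true) = false := by simp [Ne.symm hc]
        simp only [hb, Bool.false_eq_true, if_false]
        rw [ih f _ (by simpa using Nat.le_of_succ_le_succ h)]
        simp [List.filter, hc]

theorem pv_replace_space (l : List Char) :
    PySem.Chars.replace l [' '] [] = l.filter (· ≠ ' ') := by
  simp only [PySem.Chars.replace, List.isEmpty]
  exact pv_replace_space_go l l.length [] le_rfl

theorem pv_splitOn_go (l : List Char) (fuel : Nat) (cur : List Char) (acc : List (List Char))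
    (h : l.length ≤ fuel) :
    PySem.Chars.splitOn.go ['"'] fuel l cur acc
      = acc.reverse ++ (pvSplitQ l).modifyHead (fun x => cur.reverse ++ x) := by
  induction l generalizing fuel cur acc with
  | nil => cases fuel <;> simp [PySem.Chars.splitOn.go, pvSplitQ]
  | cons c t ih =>
    cases fuel with
    | zero => simp at h
    | succ f =>
      simp only [PySem.Chars.splitOn.go, List.isPrefixOf]
      by_cases hc : c = '"'
      · subst hc
        simp only [beq_self_eq_true, Bool.true_and, if_pos, List.length_cons,
          List.length_nil, List.drop_succ_cons, List.drop_zero]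
        rw [ih f _ _ (by simpa using Nat.le_of_succ_le_succ h)]
        simp only [pvSplitQ]
        obtain ⟨hd, tl, he⟩ : ∃ hd tl, pvSplitQ t = hd :: tl := by
          cases hq : pvSplitQ t with
          | nil => exact absurd hq (pvSplitQ_ne_nil t)
          | cons hd tl => exact ⟨hd, tl, rfl⟩
        simp [he, List.modifyHead]
      · have hb : (('"' == c) && true) = false := by simp [Ne.symm hc]
        simp only [hb, Bool.false_eq_true, if_false]
        rw [ih f _ _ (by simpa using Nat.le_of_succ_le_succ h)]
        obtain ⟨hd, tl, he⟩ : ∃ hd tl, pvSplitQ t = hd :: tl := by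
          cases hq : pvSplitQ t with
          | nil => exact absurd hq (pvSplitQ_ne_nil t)
          | cons hd tl => exact ⟨hd, tl, rfl⟩
        simp [pvSplitQ, hc, he, List.modifyHead]

theorem pv_splitOn_quote (l : List Char) :
    PySem.Chars.splitOn l ['"'] = pvSplitQ l := by
  simp only [PySem.Chars.splitOn]
  rw [pv_splitOn_go l (l.length + 1) [] [] (by omega)]
  cases hq : pvSplitQ l <;> simp [List.modifyHead]

theorem pv_parity_flip (n : Int) :
    (PySem.Int.mod (n + 1) 2 = 1) ↔ ¬ (PySem.Int.mod n 2 = 1) := by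
  rw [PySem.Int.mod_eq_emod_of_pos (a := n + 1) (by omega),
    PySem.Int.mod_eq_emod_of_pos (a := n) (by omega)]
  omega

-- A's loop over the segments, with its (output, iter_) state, computes pvAltS
theorem pv_foldA (segs : List (List Char)) (out : List (List Char)) (n : Int) :
    (segs.foldl
      (fun (st : List (List Char) × Int) c =>
        if PySem.Int.mod st.2 2 = 1 then (st.1 ++ [PySem.Chars.replace c [' '] []], st.2 + 1)
        else (st.1 ++ [c], st.2 + 1)) (out, n)).1
      = out ++ pvAltS (decide (PySem.Int.mod n 2 = 1)) segs := by
  induction segs generalizing out n with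
  | nil => simp [pvAltS]
  | cons h t ih =>
    simp only [List.foldl]
    by_cases hp : PySem.Int.mod n 2 = 1
    · rw [if_pos hp, ih]
      have hflip : (decide (PySem.Int.mod (n + 1) 2 = 1)) = !(decide (PySem.Int.mod n 2 = 1)) := by
        simp only [pv_parity_flip]
        cases hd : decide (PySem.Int.mod n 2 = 1) <;> simp_all
      simp only [hflip, pvAltS, hp, decide_true, Bool.not_true, if_pos]
      simp [pv_replace_space]
    · rw [if_neg hp, ih]
      have hflip : (decide (PySem.Int.mod (n + 1) 2 = 1)) = !(decide (PySem.Int.mod n 2 = 1)) := by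
        simp only [pv_parity_flip]
        cases hd : decide (PySem.Int.mod n 2 = 1) <;> simp_all
      simp only [hflip, pvAltS, hp, decide_false, Bool.not_false]
      simp

-- B's state machine computes the same segments: flag 'inside' false means stripping (= pvAltS flag !inside)
theorem pv_foldB (l : List Char) (out : List (List Char)) (cur : List Char) (inside : Bool) :
    (let st := l.foldl
      (fun (st : List (List Char) × List Char × Bool) ch =>
        let c := pvNl ch
        if c = '"' then (st.1 ++ [st.2.1], [], !st.2.2)
        else if st.2.2 then (st.1, st.2.1 ++ [c], st.2.2)
        else if c = ' ' then st
        else (st.1, st.2.1 ++ [c], st.2.2))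
      (out, cur, inside)
     st.1 ++ [st.2.1])
      = out ++ (pvAltS (!inside) (pvSplitQ (l.map pvNl))).modifyHead (fun x => cur ++ x) := by
  induction l generalizing out cur inside with
  | nil => simp [pvSplitQ, pvAltS, List.modifyHead]
  | cons ch t ih =>
    simp only [List.foldl, List.map]
    by_cases hq : pvNl ch = '"'
    · rw [if_pos hq]
      rw [ih]
      obtain ⟨hd, tl, he⟩ : ∃ hd tl, pvSplitQ (t.map pvNl) = hd :: tl := by
        cases hx : pvSplitQ (t.map pvNl) with
        | nil => exact absurd hx (pvSplitQ_ne_nil _)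
        | cons hd tl => exact ⟨hd, tl, rfl⟩
      simp [pvSplitQ, hq, pvAltS, he, List.modifyHead]
    · rw [if_neg hq]
      obtain ⟨hd, tl, he⟩ : ∃ hd tl, pvSplitQ (t.map pvNl) = hd :: tl := by
        cases hx : pvSplitQ (t.map pvNl) with
        | nil => exact absurd hx (pvSplitQ_ne_nil _)
        | cons hd tl => exact ⟨hd, tl, rfl⟩
      cases inside with
      | true =>
        rw [if_pos rfl, ih]
        simp [pvSplitQ, hq, pvAltS, he, List.modifyHead]
      | false =>
        simp only [Bool.false_eq_true, if_false]
        by_cases hs : pvNl ch = ' '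
        · rw [if_pos hs, ih]
          simp [pvSplitQ, pvAltS, he, List.modifyHead, hs]
        · rw [if_neg hs, ih]
          simp [pvSplitQ, hq, pvAltS, he, List.modifyHead, hs]

-- ===== VERDICT (by name: the statement is the Claim_ definition above) =====
theorem x_parse_py_spec : Claim_equal_x_parse_py := by
  intro code _
  show x_parse_py code = x_parse_py_alt code
  simp only [x_parse_py, x_parse_py_alt]
  rw [pv_replace_nl, pv_splitOn_quote]
  have hA := pv_foldA (pvSplitQ (code.toList.map pvNl)) [] 1
  have hB := pv_foldB code.toList [] [] false
  simp only [] at hA hB ⊢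
  rw [hA, hB]
  have : (decide (PySem.Int.mod 1 2 = 1)) = true := by decide
  rw [this]
  obtain ⟨hd, tl, he⟩ : ∃ hd tl, pvSplitQ (code.toList.map pvNl) = hd :: tl := by
    cases hx : pvSplitQ (code.toList.map pvNl) with
    | nil => exact absurd hx (pvSplitQ_ne_nil _)
    | cons hd tl => exact ⟨hd, tl, rfl⟩
  simp [he, pvAltS, List.modifyHead]
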